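-- pv_equiv track=rewrite | github.com/OscarMaciel3799/algoritmos-y-estructuras-2025 | 1° Parcial/04-Funciones y Procedimientos/Ejercicio 32.04.py | clave
-- ===== SOURCE A (Python) =====
-- def clave(n):
--     suma=0
--     while n > 9:
--         digito=n% 10
--         n=n//10
--         suma+=digito
--     suma+=n
--     return suma%7
-- ===== SOURCE B (Python) =====
-- def clave(n):
--     # Single-digit (and negative) inputs skip A's loop entirely: result is n % 7.
--     if n <= 9:
--         return n % 7
--     # Otherwise: digit sum via the decimal string representation, then mod 7.
--     return sum(map(int, str(n))) % 7
-- ===== Notes on version B (the rewrite author's own statement) =====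
-- stated objective: idiomatic
-- what changed: Replaces A's arithmetic while-loop (n%10 / n//10 with a running accumulator) by a direct digit sum over the decimal string str(n), keeping A's no-loop path for single-digit and negative inputs (n % 7) explicit.
import Mathlib
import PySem

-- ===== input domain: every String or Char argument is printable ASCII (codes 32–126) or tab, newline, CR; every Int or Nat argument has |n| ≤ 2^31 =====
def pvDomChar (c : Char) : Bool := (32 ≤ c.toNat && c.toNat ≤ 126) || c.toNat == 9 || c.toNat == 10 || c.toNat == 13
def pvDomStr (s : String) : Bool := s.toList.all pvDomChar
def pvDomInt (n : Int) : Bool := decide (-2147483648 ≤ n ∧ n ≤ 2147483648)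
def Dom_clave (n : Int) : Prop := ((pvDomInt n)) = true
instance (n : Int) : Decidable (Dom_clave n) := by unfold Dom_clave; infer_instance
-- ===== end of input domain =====

-- B replaces A's arithmetic digit-extraction loop by a digit sum over the decimal string
-- str(n) (keeping A's explicit n<=9 no-loop path); same cost, more idiomatic.

-- ===== PORT A =====
-- the while-loop of A: state (n, suma); ends returning (suma + n) % 7
def claveGo (n suma : Int) : Int :=
  if 9 < n then
    claveGo (PySem.Int.floordiv n 10) (suma + PySem.Int.mod n 10)
  else
    PySem.Int.mod (suma + n) 7
termination_by n.toNat
decreasing_by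
  rw [PySem.Int.floordiv_eq_ediv_of_pos (by omega : (0:Int) < 10)]
  omega

def clave (n : Int) : Int := claveGo n 0

-- ===== PORT B =====
-- int(c) for a single decimal digit character c (the only characters str(n) contains for
-- n > 9) is exactly c.toNat - 48; ported by hand since int() here only ever sees '0'..'9'.
def clave_alt (n : Int) : Int :=
  if n ≤ 9 then
    PySem.Int.mod n 7
  else
    PySem.Int.mod (((PySem.Int.toChars n).map (fun c => (c.toNat : Int) - 48)).sum) 7

-- ===== PRECONDITION & SPEC =====
def Spec_clave (n : Int) (out : Int) : Prop := out = clave_alt n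
instance (n : Int) (out : Int) : Decidable (Spec_clave n out) := by unfold Spec_clave; infer_instance

-- ===== CLAIM (what is proved, stated in full; the proofs are below) =====
def Claim_equal_clave : Prop := ∀ (n : Int), Dom_clave n → Spec_clave n (clave n)

-- ===== LEMMAS AND PROOFS =====

-- digit sum of a natural number, mirroring the loop structure
def dsum (m : Nat) : Nat :=
  if h : m ≤ 9 then m else m % 10 + dsum (m / 10)
termination_by m
decreasing_by omega

lemma digitChar_val {d : Nat} (hd : d < 10) :
    ((Nat.digitChar d).toNat : Int) - 48 = (d : Int) := by
  interval_cases d <;> decide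

lemma toDigitsCore_sum (f : Nat) : ∀ (n : Nat) (acc : List Char), n < f →
    ((Nat.toDigitsCore 10 f n acc).map (fun c => (c.toNat : Int) - 48)).sum
      = (dsum n : Int) + ((acc.map (fun c => (c.toNat : Int) - 48)).sum) := by
  induction f with
  | zero => intro n acc h; omega
  | succ f ih =>
    intro n acc h
    rw [Nat.toDigitsCore]
    by_cases h0 : n / 10 = 0
    · have hn9 : n ≤ 9 := by omega
      simp only [h0, if_true, List.map_cons, List.sum_cons]
      rw [dsum, dif_pos hn9, digitChar_val (by omega), Nat.mod_eq_of_lt (by omega)]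
    · simp only [h0, if_false]
      have hrec := ih (n / 10) (Nat.digitChar (n % 10) :: acc) (by omega)
      rw [hrec, show dsum n = n % 10 + dsum (n / 10) from by
        rw [dsum, dif_neg (by omega : ¬ n ≤ 9)]]
      simp only [List.map_cons, List.sum_cons]
      rw [digitChar_val (Nat.mod_lt _ (by omega))]
      push_cast
      ring

lemma claveGo_eq (m : Nat) (suma : Int) :
    claveGo (m : Int) suma = PySem.Int.mod (suma + (dsum m : Int)) 7 := by
  induction m using Nat.strong_induction_on generalizing suma with
  | _ m ih =>
    rw [claveGo, dsum]
    by_cases h : m ≤ 9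
    · rw [if_neg (by exact_mod_cast (by omega : ¬ (9:Int) < (m:Int))), dif_pos h]
    · rw [if_pos (by exact_mod_cast (by omega : (9:Int) < (m:Int))), dif_neg h]
      have h1 : PySem.Int.floordiv (m : Int) 10 = ((m / 10 : Nat) : Int) := by
        exact_mod_cast PySem.Int.floordiv_natCast m 10
      have h2 : PySem.Int.mod (m : Int) 10 = ((m % 10 : Nat) : Int) := by
        exact_mod_cast PySem.Int.mod_natCast m 10
      rw [h1, h2, ih (m / 10) (by omega)]
      push_cast
      ring_nf

-- ===== VERDICT (by name: the statement is the Claim_ definition above) =====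
theorem clave_spec : Claim_equal_clave := by
  intro n _
  show clave n = clave_alt n
  unfold clave clave_alt
  by_cases h : n ≤ 9
  · rw [if_pos h, claveGo]
    rw [if_neg (by omega)]
    rw [zero_add]
  · rw [if_neg h]
    have hn : n = (n.toNat : Int) := by omega
    have hch : PySem.Int.toChars ((n.toNat : Nat) : Int) = Nat.toDigits 10 n.toNat := by
      rw [PySem.Int.toChars, if_neg (by omega), Int.toNat_natCast]
    have hsum := toDigitsCore_sum (n.toNat + 1) n.toNat [] (by omega)
    simp only [List.map_nil, List.sum_nil, add_zero] at hsum
    rw [hn, claveGo_eq n.toNat 0, zero_add, hch, Nat.toDigits, hsum]
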